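-- pv_equiv track=rewrite | github.com/enpeluche/subset-sum-lll-mip | solvers/solve_mitm.py | _build_table_gray
-- ===== SOURCE A (Python) =====
-- def _gray_bit(i: int) -> int:
--     """Return the index of the bit that flips between Gray(i-1) and Gray(i)."""
--     return (i & -i).bit_length() - 1
--
-- def _build_table_gray(weights: list[int]) -> dict[int, int]:
--     """
--     Build {sum: gray_code_mask} for all 2^m subsets using Gray code.
--
--     Each step flips one bit → one add or subtract → O(1) per subset.
--     We store the Gray mask (not the index) so we can recover bits directly.
--     Only keeps the first occurrence per sum (sufficient for feasibility).
--     """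
--     m = len(weights)
--     size = 1 << m
--     table: dict[int, int] = {0: 0}  # empty subset → sum 0
--     s = 0
--     gray = 0
--
--     for i in range(1, size):
--         bit = _gray_bit(i)
--         gray ^= (1 << bit)
--
--         # Gray code flips one bit: add if it turned ON, subtract if OFF
--         if gray & (1 << bit):
--             s += weights[bit]
--         else:
--             s -= weights[bit]
--
--         if s not in table:
--             table[s] = gray
--
--     return table
-- ===== SOURCE B (Python) =====
-- def _build_table_gray(weights):
--     m = len(weights)
--     table = {}
--     for i in range(1 << m):
--         g = i ^ (i >> 1)          # Gray code computed directly, no incremental state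
--         s = 0
--         gg = g
--         for w in weights:         # subset sum recomputed from the mask's bits
--             if gg & 1:
--                 s += w
--             gg >>= 1
--         if s not in table:        # first occurrence per sum wins (same ascending i order)
--             table[s] = g
--     return table
-- ===== Notes on version B (the rewrite author's own statement) =====
-- stated objective: alternative
-- what changed: Each Gray mask is computed directly as g = i ^ (i >> 1) and its subset sum is recomputed from the mask's bits, replacing A's incremental one-bit-flip update of a running sum and mask (and its _gray_bit low-bit helper); the dict seed {0:0} becomes the ordinary i = 0 iteration.
import Mathlib
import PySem

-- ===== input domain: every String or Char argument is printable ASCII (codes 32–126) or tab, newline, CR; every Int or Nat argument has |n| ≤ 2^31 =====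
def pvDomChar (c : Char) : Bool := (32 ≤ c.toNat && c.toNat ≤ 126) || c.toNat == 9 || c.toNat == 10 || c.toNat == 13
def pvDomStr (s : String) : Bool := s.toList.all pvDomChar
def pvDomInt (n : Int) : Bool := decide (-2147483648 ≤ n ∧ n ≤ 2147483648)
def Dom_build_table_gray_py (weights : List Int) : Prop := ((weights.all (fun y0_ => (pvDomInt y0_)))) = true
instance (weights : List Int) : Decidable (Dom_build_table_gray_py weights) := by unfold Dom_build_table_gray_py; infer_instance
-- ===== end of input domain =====

-- B recomputes each Gray mask directly (g = i ^ (i >> 1)) and its subset sum from the mask's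
-- bits, instead of A's incremental one-bit-flip update; objective: alternative (stateless body).


-- ===== PORT A =====
-- _gray_bit: (i & -i).bit_length() - 1; for the i ≥ 1 this loop feeds it, bit_length ≥ 1,
-- so the Nat subtraction here equals Python's int subtraction.
def grayBitPy (i : Int) : Nat := PySem.Int.bitLength (PySem.Int.band i (-i)) - 1

def aStep (weights : List Int) (st : PySem.Dict Int Int × Int × Int) (i : Int) :
    PySem.Dict Int Int × Int × Int :=
  let bit := grayBitPy i
  let gray := PySem.Int.bxor st.2.2 ((1:Int) <<< bit)
  -- weights[bit]: in this loop bit < len(weights) always, so the default is never hit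
  let s := if PySem.Int.band gray ((1:Int) <<< bit) ≠ 0
           then st.2.1 + PySem.List.pyGetD weights (bit : Int) 0
           else st.2.1 - PySem.List.pyGetD weights (bit : Int) 0
  let table := if st.1.contains s then st.1 else st.1.insert s gray
  (table, s, gray)

def build_table_gray_py (weights : List Int) : List (Int × Int) :=
  ((PySem.List.pyRange 1 ((1:Int) <<< weights.length) 1).foldl (aStep weights)
    (PySem.Dict.empty.insert 0 0, 0, 0)).1.items

-- ===== PORT B =====
def bStep (weights : List Int) (table : PySem.Dict Int Int) (i : Int) : PySem.Dict Int Int :=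
  let g := PySem.Int.bxor i (i >>> (1:Nat))
  let p := weights.foldl (fun (p : Int × Int) w =>
        (if PySem.Int.band p.2 1 ≠ 0 then p.1 + w else p.1, p.2 >>> (1:Nat))) ((0:Int), g)
  if table.contains p.1 then table else table.insert p.1 g

def build_table_gray_py_alt (weights : List Int) : List (Int × Int) :=
  ((PySem.List.pyRange 0 ((1:Int) <<< weights.length) 1).foldl (bStep weights)
    PySem.Dict.empty).items

-- ===== PRECONDITION & SPEC =====
def Spec_build_table_gray_py (weights : List Int) (out : List (Int × Int)) : Prop := out = build_table_gray_py_alt weights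
instance (weights : List Int) (out : List (Int × Int)) : Decidable (Spec_build_table_gray_py weights out) := by unfold Spec_build_table_gray_py; infer_instance

-- ===== CLAIM (what is proved, stated in full; the proofs are below) =====
def Claim_equal_build_table_gray_py : Prop := ∀ (weights : List Int), Dom_build_table_gray_py weights → Spec_build_table_gray_py weights (build_table_gray_py weights)

-- ===== LEMMAS AND PROOFS =====

-- trailing-zero count of a positive number (0 for 0)
def ltz : Nat → Nat
  | 0 => 0
  | (n+1) => if (n+1) % 2 = 1 then 0 else ltz ((n+1)/2) + 1
decreasing_by omega

-- the Gray code of n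
def grayN (n : Nat) : Nat := n ^^^ (n >>> 1)

-- reference value of B's inner subset-sum loop
def sumW (w : List Int) (g : Nat) : Int :=
  ∑ b ∈ Finset.range w.length, if g.testBit b then w.getD b 0 else 0

theorem ltz_odd {i : Nat} (h : i % 2 = 1) : ltz i = 0 := by
  cases i with
  | zero => simp at h
  | succ n => rw [ltz]; simp [h]

theorem ltz_even {j : Nat} (hj : 0 < j) : ltz (2 * j) = ltz j + 1 := by
  have h2 : 2 * j ≠ 0 := by omega
  cases e : 2 * j with
  | zero => omega
  | succ n =>
      rw [ltz]
      have hmod : (n+1) % 2 = 0 := by omega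
      have hdiv : (n+1) / 2 = j := by omega
      simp [hmod, hdiv]

theorem two_pow_ltz_le {i : Nat} (h : 0 < i) : 2 ^ (ltz i) ≤ i := by
  induction i using Nat.strong_induction_on with
  | _ i ih =>
    rcases Nat.even_or_odd i with he | ho
    · obtain ⟨j, hj⟩ := he
      have hj1 : 0 < j := by omega
      have : i = 2 * j := by omega
      subst this
      rw [ltz_even hj1]
      have := ih j (by omega) hj1
      calc 2 ^ (ltz j + 1) = 2 * 2 ^ ltz j := by ring
        _ ≤ 2 * j := by omega
    · rw [ltz_odd (Nat.odd_iff.mp ho)]; omega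

theorem and_pred {i : Nat} (h : 0 < i) : i &&& (i - 1) = i - 2 ^ (ltz i) := by
  induction i using Nat.strong_induction_on with
  | _ i ih =>
    rcases Nat.even_or_odd i with he | ho
    · obtain ⟨j, hj⟩ := he
      have hj1 : 0 < j := by omega
      have hi : i = 2 * j := by omega
      subst hi
      have key : 2 * j &&& (2 * j - 1) = 2 * (j &&& (j - 1)) := by
        apply Nat.eq_of_testBit_eq
        intro k
        cases k with
        | zero =>
            simp [Nat.testBit_zero]
        | succ k =>
            have h1 : (2 * j) / 2 = j := by omega
            have h2 : (2 * j - 1) / 2 = j - 1 := by omega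
            have h3 : (2 * (j &&& (j-1))) / 2 = j &&& (j-1) := by omega
            rw [Nat.testBit_and, Nat.testBit_succ, Nat.testBit_succ, h1, h2,
              Nat.testBit_succ, h3, Nat.testBit_and]
      rw [key, ih j (by omega) hj1, ltz_even hj1]
      have hle : 2 ^ ltz j ≤ j := two_pow_ltz_le hj1
      have : 2 ^ (ltz j + 1) = 2 * 2 ^ ltz j := by ring
      omega
    · have hodd := Nat.odd_iff.mp ho
      rw [ltz_odd hodd]
      have key : i &&& (i - 1) = i - 1 := by
        apply Nat.eq_of_testBit_eq
        intro k
        cases k with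
        | zero => simp [Nat.testBit_zero]; omega
        | succ k =>
            have h1 : i / 2 = (i - 1) / 2 := by omega
            rw [Nat.testBit_and]
            simp [Nat.testBit_succ, h1]
      rw [key]; omega

theorem xor_pred {i : Nat} (h : 0 < i) : i ^^^ (i - 1) = 2 ^ (ltz i + 1) - 1 := by
  induction i using Nat.strong_induction_on with
  | _ i ih =>
    rcases Nat.even_or_odd i with he | ho
    · obtain ⟨j, hj⟩ := he
      have hj1 : 0 < j := by omega
      have hi : i = 2 * j := by omega
      subst hi
      have ihj := ih j (by omega) hj1
      rw [ltz_even hj1]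
      apply Nat.eq_of_testBit_eq
      intro k
      cases k with
      | zero =>
          simp [Nat.testBit_zero]
          omega
      | succ k =>
          have h1 : (2 * j) / 2 = j := by omega
          have h2 : (2 * j - 1) / 2 = j - 1 := by omega
          have L : (2 * j ^^^ (2 * j - 1)).testBit (k+1) = (j ^^^ (j - 1)).testBit k := by
            rw [Nat.testBit_xor, Nat.testBit_succ, Nat.testBit_succ, h1, h2, ← Nat.testBit_xor]
          rw [L, ihj, Nat.testBit_two_pow_sub_one, Nat.testBit_two_pow_sub_one]
          exact decide_eq_decide.mpr (by omega)
    · have hodd := Nat.odd_iff.mp ho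
      rw [ltz_odd hodd]
      apply Nat.eq_of_testBit_eq
      intro k
      cases k with
      | zero =>
          simp [Nat.testBit_zero]
          omega
      | succ k =>
          have h1 : i / 2 = (i - 1) / 2 := by omega
          rw [Nat.testBit_xor]
          simp [Nat.testBit_succ, h1]

theorem shiftRight_xor (a b : Nat) : (a ^^^ b) >>> 1 = (a >>> 1) ^^^ (b >>> 1) := by
  apply Nat.eq_of_testBit_eq
  intro k
  simp [Nat.testBit_shiftRight, Nat.testBit_xor]

theorem gray_step {i : Nat} (h : 0 < i) : grayN i = grayN (i - 1) ^^^ 2 ^ (ltz i) := by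
  have key : grayN i ^^^ grayN (i - 1) = 2 ^ (ltz i) := by
    have h1 : grayN i ^^^ grayN (i - 1) = (i ^^^ (i - 1)) ^^^ ((i ^^^ (i - 1)) >>> 1) := by
      unfold grayN
      rw [shiftRight_xor]
      rw [Nat.xor_assoc, Nat.xor_assoc]
      congr 1
      rw [← Nat.xor_assoc, ← Nat.xor_assoc, Nat.xor_comm (i >>> 1)]
    rw [h1, xor_pred h]
    have h2 : (2 ^ (ltz i + 1) - 1) >>> 1 = 2 ^ (ltz i) - 1 := by
      rw [Nat.shiftRight_one]
      have : 2 ^ (ltz i + 1) = 2 * 2 ^ ltz i := by ring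
      omega
    rw [h2]
    apply Nat.eq_of_testBit_eq
    intro k
    simp only [Nat.testBit_xor, Nat.testBit_two_pow_sub_one, Nat.testBit_two_pow]
    by_cases h1 : ltz i = k
    · subst h1; simp
    · have h2 : (k < ltz i + 1) = (k < ltz i) := by
        apply propext; omega
      simp [h1, h2]
  calc grayN i = grayN i ^^^ grayN (i-1) ^^^ grayN (i-1) := by
        rw [Nat.xor_assoc, Nat.xor_self, Nat.xor_zero]
    _ = grayN (i-1) ^^^ 2 ^ (ltz i) := by rw [key, Nat.xor_comm]

-- bit_length of a power of two
theorem bitLength_two_pow (t : Nat) : PySem.Int.bitLength ((2^t : Nat) : Int) = t + 1 := by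
  induction t with
  | zero => decide
  | succ t ih =>
      rw [PySem.Int.bitLength_natCast (by positivity)]
      have h : 2 ^ (t+1) / 2 = 2 ^ t := by omega
      rw [h, ih]

-- A's _gray_bit at i = n+1 computes ltz (n+1)
theorem grayBitPy_eq (n : Nat) : grayBitPy ((n+1 : Nat) : Int) = ltz (n+1) := by
  have hb : PySem.Int.band ((n+1 : Nat) : Int) (-((n+1 : Nat) : Int))
      = (((n+1) - ((n+1) &&& n) : Nat) : Int) := by
    have c1 : (0:Int) ≤ ((n+1:Nat):Int) := by push_cast; omega
    have c2 : ¬ ((0:Int) ≤ -((n+1:Nat):Int)) := by push_cast; omega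
    simp [PySem.Int.band]
    have d1 : (0:Int) ≤ (n:Int) + 1 := by omega
    have d2 : ¬ ((n:Int) ≤ -1) := by omega
    rw [if_pos d1, if_neg d2]
  have hand : (n+1) &&& n = (n+1) - 2 ^ ltz (n+1) := by
    have := and_pred (i := n+1) (by omega)
    simpa using this
  have hle : 2 ^ ltz (n+1) ≤ n + 1 := two_pow_ltz_le (by omega)
  have hv : (n+1) - ((n+1) &&& n) = 2 ^ ltz (n+1) := by
    rw [hand, Nat.sub_sub_self hle]
  unfold grayBitPy
  rw [hb, hv, bitLength_two_pow]
  omega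

-- the flip of bit t changes the subset sum by ± weights[t]
theorem sumW_flip (w : List Int) (g : Nat) {t : Nat} (ht : t < w.length) :
    sumW w (g ^^^ 2 ^ t) =
      if (g ^^^ 2 ^ t).testBit t then sumW w g + w.getD t 0 else sumW w g - w.getD t 0 := by
  have hmem : t ∈ Finset.range w.length := Finset.mem_range.mpr ht
  have hsplit : ∀ g' : Nat, sumW w g' =
      (if g'.testBit t then w.getD t 0 else 0) +
        ∑ b ∈ (Finset.range w.length).erase t, (if g'.testBit b then w.getD b 0 else 0) := by
    intro g'
    rw [sumW, ← Finset.add_sum_erase _ _ hmem]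
  have herase : ∀ b ∈ (Finset.range w.length).erase t,
      (if (g ^^^ 2 ^ t).testBit b then w.getD b 0 else 0) = (if g.testBit b then w.getD b 0 else 0) := by
    intro b hbmem
    have hbt : t ≠ b := fun h => (Finset.ne_of_mem_erase hbmem) h.symm
    simp [Nat.testBit_xor, hbt]
  rw [hsplit, hsplit g, Finset.sum_congr rfl herase]
  have hflip : (g ^^^ 2 ^ t).testBit t = !g.testBit t := by
    simp [Nat.testBit_xor]
  cases hgt : g.testBit t <;> simp [hflip, hgt]
  ring

-- B's inner loop computes sumW
theorem bInner (w : List Int) (gn : Nat) (s0 : Int) :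
    (w.foldl (fun (p : Int × Int) x =>
        (if PySem.Int.band p.2 1 ≠ 0 then p.1 + x else p.1, p.2 >>> (1:Nat))) (s0, (gn : Int))).1
      = s0 + sumW w gn := by
  induction w generalizing gn s0 with
  | nil => simp [sumW]
  | cons x xs ih =>
      have hband : PySem.Int.band ((gn : Nat) : Int) 1 = ((gn &&& 1 : Nat) : Int) := by
        exact_mod_cast PySem.Int.band_natCast gn 1
      have hshift : ((gn : Nat) : Int) >>> (1:Nat) = ((gn >>> 1 : Nat) : Int) := by simp
      have hcons : sumW (x :: xs) gn = (if gn.testBit 0 then x else 0) + sumW xs (gn >>> 1) := by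
        rw [sumW, sumW]
        simp only [List.length_cons]
        rw [Finset.sum_range_succ']
        have hre : ∀ b, (if gn.testBit (b+1) then (x :: xs).getD (b+1) 0 else 0)
            = (if (gn >>> 1).testBit b then xs.getD b 0 else 0) := by
          intro b
          have : (gn >>> 1).testBit b = gn.testBit (1 + b) := Nat.testBit_shiftRight gn
          rw [this, Nat.add_comm 1 b]
          rfl
        simp only [hre]
        exact add_comm _ _
      rw [List.foldl_cons, hband, hshift]
      have hbit : ((gn &&& 1 : Nat) : Int) ≠ 0 ↔ gn.testBit 0 = true := by
        rw [Nat.and_one_is_mod, Nat.testBit_zero]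
        constructor
        · intro h; simp; omega
        · intro h; simp at h; omega
      by_cases hg : gn.testBit 0
      · rw [if_pos (hbit.mpr hg), ih, hcons, if_pos hg]; ring
      · rw [if_neg (fun hc => hg (hbit.mp hc)), ih, hcons, if_neg (by simp [hg])]; ring

-- one B-loop iteration, evaluated
theorem bStep_eval (w : List Int) (d : PySem.Dict Int Int) (k : Nat) :
    bStep w d ((k : Nat) : Int)
      = (if d.contains (sumW w (grayN k)) then d
         else d.insert (sumW w (grayN k)) ((grayN k : Nat) : Int)) := by
  unfold bStep
  dsimp only
  have hsh : ((k : Nat) : Int) >>> (1:Nat) = ((k >>> 1 : Nat) : Int) := by simp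
  have hg : PySem.Int.bxor ((k : Nat) : Int) (((k : Nat) : Int) >>> (1:Nat))
      = ((grayN k : Nat) : Int) := by
    rw [hsh]; exact_mod_cast PySem.Int.bxor_natCast k (k >>> 1)
  rw [hg, bInner w (grayN k) 0, zero_add]

-- one A-loop iteration, evaluated on the invariant state
theorem aStep_eval (w : List Int) (d : PySem.Dict Int Int) (n : Nat)
    (ht : ltz (n+1) < w.length) :
    aStep w (d, sumW w (grayN n), ((grayN n : Nat) : Int)) ((n+1 : Nat) : Int)
      = (if d.contains (sumW w (grayN (n+1))) then d
         else d.insert (sumW w (grayN (n+1))) ((grayN (n+1) : Nat) : Int),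
         sumW w (grayN (n+1)), ((grayN (n+1) : Nat) : Int)) := by
  have hstep : grayN (n+1) = grayN n ^^^ 2 ^ ltz (n+1) := by
    simpa using gray_step (i := n+1) (by omega)
  have hshl : ((1:Int) <<< ltz (n+1)) = ((2 ^ ltz (n+1) : Nat) : Int) := by
    simp [Int.shiftLeft_eq]
  have hgray : PySem.Int.bxor ((grayN n : Nat) : Int) ((2 ^ ltz (n+1) : Nat) : Int)
      = ((grayN (n+1) : Nat) : Int) := by
    rw [PySem.Int.bxor_natCast, ← hstep]
  have hband : PySem.Int.band ((grayN (n+1) : Nat) : Int) ((2 ^ ltz (n+1) : Nat) : Int)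
      = (((grayN (n+1)) &&& 2 ^ ltz (n+1) : Nat) : Int) := PySem.Int.band_natCast _ _
  have hcond : ((((grayN (n+1)) &&& 2 ^ ltz (n+1) : Nat) : Int) ≠ 0)
      = ((grayN (n+1)).testBit (ltz (n+1)) = true) := by
    apply propext
    rw [Nat.and_two_pow]
    cases hgt : (grayN (n+1)).testBit (ltz (n+1)) <;> simp
  have hget : PySem.List.pyGetD w ((ltz (n+1) : Nat) : Int) 0 = w.getD (ltz (n+1)) 0 :=
    PySem.List.pyGetD_natCast w _ 0
  have hsum : (if (grayN (n+1)).testBit (ltz (n+1))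
        then sumW w (grayN n) + w.getD (ltz (n+1)) 0
        else sumW w (grayN n) - w.getD (ltz (n+1)) 0) = sumW w (grayN (n+1)) := by
    have hf := sumW_flip w (grayN n) (t := ltz (n+1)) ht
    rw [← hstep] at hf
    exact hf.symm
  unfold aStep
  dsimp only
  rw [grayBitPy_eq n, hshl, hgray, hband, hget]
  simp only [hcond, hsum]

-- the main loop invariant
theorem main_loop (w : List Int) (n : Nat) (hn : n < 2 ^ w.length) :
    (PySem.List.pyRange 1 ((n : Int) + 1) 1).foldl (aStep w) (PySem.Dict.empty.insert 0 0, 0, 0)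
      = ((PySem.List.pyRange 0 ((n : Int) + 1) 1).foldl (bStep w) PySem.Dict.empty,
         sumW w (grayN n), ((grayN n : Nat) : Int)) := by
  induction n with
  | zero =>
      have h1 : PySem.List.pyRange 1 ((0:Nat) + 1) 1 = [] := by
        norm_num [PySem.List.pyRange_one_eq_nil]
      have h2 : PySem.List.pyRange 0 ((0:Nat) + 1) 1 = [(0:Int)] := by
        have := PySem.List.pyRange_one_singleton (0:Int)
        norm_num at this ⊢
        exact this
      rw [h1, h2]
      simp only [List.foldl_cons, List.foldl_nil]
      have hb := bStep_eval w PySem.Dict.empty 0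
      norm_num at hb ⊢
      rw [hb]
      have hg0 : grayN 0 = 0 := by decide
      have hs0 : sumW w 0 = 0 := by simp [sumW]
      rw [hg0, hs0]
      simp
  | succ n ih =>
      have hcast : ((n+1 : Nat) : Int) = ((n : Nat) : Int) + 1 := by push_cast; ring
      have hLa : PySem.List.pyRange 1 (((n+1 : Nat) : Int) + 1) 1
          = PySem.List.pyRange 1 (((n : Nat) : Int) + 1) 1 ++ [((n+1 : Nat) : Int)] := by
        rw [hcast, PySem.List.pyRange_one_succ_right (by omega)]
      have hLb : PySem.List.pyRange 0 (((n+1 : Nat) : Int) + 1) 1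
          = PySem.List.pyRange 0 (((n : Nat) : Int) + 1) 1 ++ [((n+1 : Nat) : Int)] := by
        rw [hcast, PySem.List.pyRange_one_succ_right (by omega)]
      have ht : ltz (n+1) < w.length := by
        have h1 : 2 ^ ltz (n+1) ≤ n + 1 := two_pow_ltz_le (by omega)
        have h2 : 2 ^ ltz (n+1) < 2 ^ w.length := by omega
        exact (Nat.pow_lt_pow_iff_right (by omega)).mp h2
      rw [hLa, hLb, List.foldl_append, List.foldl_append, ih (by omega)]
      simp only [List.foldl_cons, List.foldl_nil]
      rw [aStep_eval w _ n ht, bStep_eval w _ (n+1)]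

-- ===== VERDICT (by name: the statement is the Claim_ definition above) =====
theorem build_table_gray_py_spec : Claim_equal_build_table_gray_py := by
  intro w _
  unfold Spec_build_table_gray_py build_table_gray_py build_table_gray_py_alt
  have hone : ((1:Int) <<< w.length) = ((2 ^ w.length : Nat) : Int) := by
    simp [Int.shiftLeft_eq]
  have hpos : 0 < 2 ^ w.length := Nat.two_pow_pos w.length
  rw [hone]
  generalize hM : 2 ^ w.length = M at *
  have hcast : ((M : Nat) : Int) = (((M - 1 : Nat) : Int) + 1) := by omega
  rw [hcast, main_loop w (M - 1) (by omega)]
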